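-- pv_equiv track=rewrite | github.com/SeongcheolJeong/Autonomy-E2E-Codebase | 30_Projects/P_E2E_Stack/prototype/matrix_profile_selector_contract.py | collect_unique_profile_ids
-- ===== SOURCE A (Python) =====
-- from collections.abc import Iterable, Sequence
--
-- def collect_unique_profile_ids(values: Iterable[str]) -> tuple[list[str], list[str]]:
--     selected: list[str] = []
--     seen: set[str] = set()
--     duplicates: list[str] = []
--     duplicates_seen: set[str] = set()
--     for raw in values:
--         profile_id = str(raw).strip()
--         if not profile_id:
--             continue
--         if profile_id in seen:
--             if profile_id not in duplicates_seen:
--                 duplicates.append(profile_id)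
--                 duplicates_seen.add(profile_id)
--             continue
--         seen.add(profile_id)
--         selected.append(profile_id)
--     return selected, duplicates
-- ===== SOURCE B (Python) =====
-- def collect_unique_profile_ids(values):
--     cleaned = [s for raw in values if (s := str(raw).strip())]
--     selected = list(dict.fromkeys(cleaned))
--     duplicates = []
--     counts = {}
--     for pid in cleaned:
--         c = counts.get(pid, 0) + 1
--         counts[pid] = c
--         if c == 2:
--             duplicates.append(pid)
--     return selected, duplicates
-- ===== Notes on version B (the rewrite author's own statement) =====
-- stated objective: idiomatic
-- what changed: Single stateful loop over four accumulators replaced by a multi-pass pipeline: clean/strip once into a list, dedup via dict.fromkeys for selected, and a separate counting pass (occurrence counter) that emits an id to duplicates exactly when its count reaches 2.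
import Mathlib
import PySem

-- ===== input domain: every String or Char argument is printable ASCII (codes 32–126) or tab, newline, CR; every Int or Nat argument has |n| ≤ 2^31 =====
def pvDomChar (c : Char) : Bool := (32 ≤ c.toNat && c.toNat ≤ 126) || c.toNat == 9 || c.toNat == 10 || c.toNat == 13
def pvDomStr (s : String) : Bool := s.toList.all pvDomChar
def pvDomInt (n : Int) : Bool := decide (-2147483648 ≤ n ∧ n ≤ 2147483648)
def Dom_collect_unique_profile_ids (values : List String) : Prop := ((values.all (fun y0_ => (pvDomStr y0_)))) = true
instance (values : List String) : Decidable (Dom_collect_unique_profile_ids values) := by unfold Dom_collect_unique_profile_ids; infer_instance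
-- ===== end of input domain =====

-- B replaces A's single four-accumulator loop by a multi-pass pipeline (strip/clean once,
-- dict.fromkeys dedup for selected, a separate counting pass for duplicates); same cost, more idiomatic.

-- ===== PORT A =====
def collect_unique_profile_ids (values : List String) : List String × List String :=
  let st := values.foldl
    (fun (st : List String × PySem.Set String × List String × PySem.Set String) raw =>
      let profile_id := PySem.Str.strip raw
      if profile_id = "" then st
      else if PySem.Set.contains st.2.1 profile_id then
        (if !PySem.Set.contains st.2.2.2 profile_id then
          (st.1, st.2.1, st.2.2.1 ++ [profile_id], PySem.Set.add st.2.2.2 profile_id)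
         else st)
      else (st.1 ++ [profile_id], PySem.Set.add st.2.1 profile_id, st.2.2.1, st.2.2.2))
    ([], PySem.Set.empty, [], PySem.Set.empty)
  (st.1, st.2.2.1)

-- ===== PORT B =====
def collect_unique_profile_ids_alt (values : List String) : List String × List String :=
  let cleaned := values.filterMap (fun raw =>
    let s := PySem.Str.strip raw
    if s = "" then none else some s)
  let selected := PySem.List.dedup cleaned
  let st := cleaned.foldl
    (fun (st : PySem.Dict String Int × List String) pid =>
      let c := PySem.Dict.getD st.1 pid 0 + 1
      (PySem.Dict.insert st.1 pid c, if c = 2 then st.2 ++ [pid] else st.2))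
    (PySem.Dict.empty, [])
  (selected, st.2)

-- ===== PRECONDITION & SPEC =====
def Spec_collect_unique_profile_ids (values : List String) (out : List String × List String) : Prop := out = collect_unique_profile_ids_alt values
instance (values : List String) (out : List String × List String) : Decidable (Spec_collect_unique_profile_ids values out) := by unfold Spec_collect_unique_profile_ids; infer_instance

-- ===== CLAIM (what is proved, stated in full; the proofs are below) =====
def Claim_equal_collect_unique_profile_ids : Prop := ∀ (values : List String), Dom_collect_unique_profile_ids values → Spec_collect_unique_profile_ids values (collect_unique_profile_ids values)

-- ===== LEMMAS AND PROOFS =====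

-- A's loop body once the empty/strip preprocessing is factored out (membership form).
def pvStepA (st : List String × PySem.Set String × List String × PySem.Set String) (pid : String) :
    List String × PySem.Set String × List String × PySem.Set String :=
  if pid ∈ st.2.1 then
    (if pid ∈ st.2.2.2 then st
     else (st.1, st.2.1, st.2.2.1 ++ [pid], PySem.Set.add st.2.2.2 pid))
  else (st.1 ++ [pid], PySem.Set.add st.2.1 pid, st.2.2.1, st.2.2.2)

-- B's counting-loop body (let-free form of the fold body in the port of B; definitionally equal).
def pvStepB (st : PySem.Dict String Int × List String) (pid : String) :
    PySem.Dict String Int × List String :=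
  (PySem.Dict.insert st.1 pid (PySem.Dict.getD st.1 pid 0 + 1),
   if PySem.Dict.getD st.1 pid 0 + 1 = 2 then st.2 ++ [pid] else st.2)

-- A's raw loop equals the same loop run over the cleaned (stripped, non-empty) list.
lemma pvFoldRaw_eq (values : List String)
    (st : List String × PySem.Set String × List String × PySem.Set String) :
    values.foldl
      (fun (st : List String × PySem.Set String × List String × PySem.Set String) raw =>
        let profile_id := PySem.Str.strip raw
        if profile_id = "" then st
        else if PySem.Set.contains st.2.1 profile_id then
          (if !PySem.Set.contains st.2.2.2 profile_id then
            (st.1, st.2.1, st.2.2.1 ++ [profile_id], PySem.Set.add st.2.2.2 profile_id)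
           else st)
        else (st.1 ++ [profile_id], PySem.Set.add st.2.1 profile_id, st.2.2.1, st.2.2.2)) st
    = (values.filterMap (fun raw =>
        let s := PySem.Str.strip raw
        if s = "" then none else some s)).foldl pvStepA st := by
  induction values generalizing st with
  | nil => rfl
  | cons raw rest ih =>
    by_cases h : PySem.Str.strip raw = ""
    · rw [List.foldl_cons, List.filterMap_cons]
      simpa [h] using ih st
    · have hg : List.filterMap (fun raw =>
          let s := PySem.Str.strip raw
          if s = "" then none else some s) (raw :: rest)
          = PySem.Str.strip raw :: List.filterMap (fun raw =>
              let s := PySem.Str.strip raw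
              if s = "" then none else some s) rest := by
        simp [h]
      have hAB :
          (let profile_id := PySem.Str.strip raw
           if profile_id = "" then st
           else if PySem.Set.contains st.2.1 profile_id then
             (if !PySem.Set.contains st.2.2.2 profile_id then
               (st.1, st.2.1, st.2.2.1 ++ [profile_id], PySem.Set.add st.2.2.2 profile_id)
              else st)
           else (st.1 ++ [profile_id], PySem.Set.add st.2.1 profile_id, st.2.2.1, st.2.2.2))
          = pvStepA st (PySem.Str.strip raw) := by
        simp [pvStepA, h]
      rw [hg, List.foldl_cons, List.foldl_cons, hAB]
      exact ih _

-- selected component: A's loop appends exactly the elements new to `seen`.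
lemma pvSelA (l : List String) (sel dup : List String) (seen dseen : PySem.Set String) :
    (l.foldl pvStepA (sel, seen, dup, dseen)).1
      = sel ++ (PySem.Set.update seen l).drop seen.length := by
  induction l generalizing sel dup seen dseen with
  | nil => simp [PySem.Set.update]
  | cons x t ih =>
    rw [List.foldl_cons, PySem.Set.update_cons]
    by_cases hx : x ∈ seen
    · have hadd : PySem.Set.add seen x = seen := by
        simp [PySem.Set.add, hx]
      rw [hadd]
      by_cases hd : x ∈ dseen
      · have hstep : pvStepA (sel, seen, dup, dseen) x = (sel, seen, dup, dseen) := by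
          simp [pvStepA, hx, hd]
        rw [hstep, ih]
      · have hstep : pvStepA (sel, seen, dup, dseen) x
            = (sel, seen, dup ++ [x], PySem.Set.add dseen x) := by
          simp [pvStepA, hx, hd]
        rw [hstep, ih]
    · have hadd : PySem.Set.add seen x = seen ++ [x] := by
        simp [PySem.Set.add, hx]
      have hstep : pvStepA (sel, seen, dup, dseen) x
          = (sel ++ [x], seen ++ [x], dup, dseen) := by
        simp [pvStepA, hx]
      rw [hadd, hstep, ih, PySem.Set.update_eq_append_filter (seen ++ [x]) t]
      rw [List.drop_left, List.append_assoc seen [x], List.drop_left]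
      simp

-- duplicates component: A's (seen, duplicates_seen) sets simulate B's counting dictionary.
lemma pvDupA (l : List String) (sel dup : List String) (seen dseen : PySem.Set String)
    (counts : PySem.Dict String Int)
    (h0 : ∀ x, 0 ≤ counts.getD x 0)
    (h1 : ∀ x, x ∈ seen ↔ 1 ≤ counts.getD x 0)
    (h2 : ∀ x, x ∈ dseen ↔ 2 ≤ counts.getD x 0) :
    (l.foldl pvStepA (sel, seen, dup, dseen)).2.2.1
      = (l.foldl pvStepB (counts, dup)).2 := by
  induction l generalizing sel dup seen dseen counts with
  | nil => rfl
  | cons x t ih =>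
    rw [List.foldl_cons, List.foldl_cons]
    by_cases hx : x ∈ seen
    · have h1x : 1 ≤ counts.getD x 0 := (h1 x).mp hx
      by_cases hd : x ∈ dseen
      · have h2x : 2 ≤ counts.getD x 0 := (h2 x).mp hd
        have hne : ¬(counts.getD x 0 + 1 = 2) := by omega
        have hstepA : pvStepA (sel, seen, dup, dseen) x = (sel, seen, dup, dseen) := by
          simp [pvStepA, hx, hd]
        have hstepB : pvStepB (counts, dup) x
            = (counts.insert x (counts.getD x 0 + 1), dup) := by simp [pvStepB, hne]
        rw [hstepA, hstepB]
        refine ih sel dup seen dseen _ ?_ ?_ ?_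
        · intro y; rw [PySem.Dict.getD_insert]; split_ifs with h
          · omega
          · exact h0 y
        · intro y; rw [PySem.Dict.getD_insert]; split_ifs with h
          · subst h; exact iff_of_true hx (by omega)
          · exact h1 y
        · intro y; rw [PySem.Dict.getD_insert]; split_ifs with h
          · subst h; exact iff_of_true hd (by omega)
          · exact h2 y
      · have h2x : ¬ 2 ≤ counts.getD x 0 := fun hc => hd ((h2 x).mpr hc)
        have heq : counts.getD x 0 + 1 = 2 := by omega
        have hstepA : pvStepA (sel, seen, dup, dseen) x
            = (sel, seen, dup ++ [x], PySem.Set.add dseen x) := by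
          simp [pvStepA, hx, hd]
        have hstepB : pvStepB (counts, dup) x
            = (counts.insert x (counts.getD x 0 + 1), dup ++ [x]) := by simp [pvStepB, heq]
        rw [hstepA, hstepB]
        refine ih sel (dup ++ [x]) seen (PySem.Set.add dseen x) _ ?_ ?_ ?_
        · intro y; rw [PySem.Dict.getD_insert]; split_ifs with h
          · omega
          · exact h0 y
        · intro y; rw [PySem.Dict.getD_insert]; split_ifs with h
          · subst h; exact iff_of_true hx (by omega)
          · exact h1 y
        · intro y; rw [PySem.Dict.getD_insert]; split_ifs with h
          · subst h
            exact iff_of_true ((PySem.Set.mem_add _ _ _).mpr (Or.inr rfl)) (by omega)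
          · rw [PySem.Set.mem_add]
            simp only [h, or_false]
            exact h2 y
    · have h1x : ¬ 1 ≤ counts.getD x 0 := fun hc => hx ((h1 x).mpr hc)
      have hz : counts.getD x 0 = 0 := le_antisymm (by omega) (h0 x)
      have hne : ¬(counts.getD x 0 + 1 = 2) := by omega
      have hstepA : pvStepA (sel, seen, dup, dseen) x
          = (sel ++ [x], PySem.Set.add seen x, dup, dseen) := by
        simp [pvStepA, hx]
      have hstepB : pvStepB (counts, dup) x
          = (counts.insert x (counts.getD x 0 + 1), dup) := by simp [pvStepB, hne]
      rw [hstepA, hstepB]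
      refine ih (sel ++ [x]) dup (PySem.Set.add seen x) dseen _ ?_ ?_ ?_
      · intro y; rw [PySem.Dict.getD_insert]; split_ifs with h
        · omega
        · exact h0 y
      · intro y; rw [PySem.Dict.getD_insert]; split_ifs with h
        · subst h
          exact iff_of_true ((PySem.Set.mem_add _ _ _).mpr (Or.inr rfl)) (by omega)
        · rw [PySem.Set.mem_add]
          simp only [h, or_false]
          exact h1 y
      · intro y; rw [PySem.Dict.getD_insert]; split_ifs with h
        · subst h
          rw [hz]
          exact iff_of_false (fun hm => absurd ((h2 y).mp hm) (by omega)) (by omega)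
        · exact h2 y

-- ===== VERDICT (by name: the statement is the Claim_ definition above) =====
theorem collect_unique_profile_ids_spec : Claim_equal_collect_unique_profile_ids := by
  intro values _
  show collect_unique_profile_ids values = collect_unique_profile_ids_alt values
  refine Prod.ext ?_ ?_
  · show (values.foldl
      (fun (st : List String × PySem.Set String × List String × PySem.Set String) raw =>
        let profile_id := PySem.Str.strip raw
        if profile_id = "" then st
        else if PySem.Set.contains st.2.1 profile_id then
          (if !PySem.Set.contains st.2.2.2 profile_id then
            (st.1, st.2.1, st.2.2.1 ++ [profile_id], PySem.Set.add st.2.2.2 profile_id)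
           else st)
        else (st.1 ++ [profile_id], PySem.Set.add st.2.1 profile_id, st.2.2.1, st.2.2.2))
      ([], PySem.Set.empty, [], PySem.Set.empty)).1
      = PySem.List.dedup (values.filterMap (fun raw =>
          let s := PySem.Str.strip raw
          if s = "" then none else some s))
    rw [pvFoldRaw_eq, pvSelA, PySem.List.dedup_eq_ofList, ← PySem.Set.update_nil_left]
    simp [PySem.Set.empty]
  · show (values.foldl
      (fun (st : List String × PySem.Set String × List String × PySem.Set String) raw =>
        let profile_id := PySem.Str.strip raw
        if profile_id = "" then st
        else if PySem.Set.contains st.2.1 profile_id then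
          (if !PySem.Set.contains st.2.2.2 profile_id then
            (st.1, st.2.1, st.2.2.1 ++ [profile_id], PySem.Set.add st.2.2.2 profile_id)
           else st)
        else (st.1 ++ [profile_id], PySem.Set.add st.2.1 profile_id, st.2.2.1, st.2.2.2))
      ([], PySem.Set.empty, [], PySem.Set.empty)).2.2.1
      = ((values.filterMap (fun raw =>
          let s := PySem.Str.strip raw
          if s = "" then none else some s)).foldl pvStepB (PySem.Dict.empty, [])).2
    rw [pvFoldRaw_eq]
    exact pvDupA _ [] [] PySem.Set.empty PySem.Set.empty PySem.Dict.empty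
      (fun x => by simp [PySem.Dict.getD_empty])
      (fun x => by simp [PySem.Set.empty, PySem.Dict.getD_empty])
      (fun x => by simp [PySem.Set.empty, PySem.Dict.getD_empty])
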